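-- pv_equiv track=rewrite | github.com/eirikgje/grant_management | plot_utils.py | determine_plot_timelines
-- ===== SOURCE A (Python) =====
-- def determine_plot_timelines(entities):
--     start_date = None
--     end_date = None
--     for entity in entities:
--         if entity['start_date'] == "None":
--             continue
--         if start_date is None or entity['start_date'] < start_date:
--             start_date = entity['start_date']
--         if end_date is None or entity['end_date'] > end_date:
--             end_date = entity['end_date']
--     return start_date, end_date
-- ===== SOURCE B (Python) =====
-- def determine_plot_timelines(entities):
--     starts = sorted(e['start_date'] for e in entities if e['start_date'] != "None")
--     ends = sorted(e['end_date'] for e in entities if e['start_date'] != "None")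
--     if not starts:
--         return None, None
--     return starts[0], ends[-1]
-- ===== Notes on version B (the rewrite author's own statement) =====
-- stated objective: alternative
-- what changed: Replaces A's single fused loop threading two Optional running extremes with a sort-based approach: sort the usable start dates and take the first, sort the corresponding end dates and take the last.
import Mathlib
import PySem

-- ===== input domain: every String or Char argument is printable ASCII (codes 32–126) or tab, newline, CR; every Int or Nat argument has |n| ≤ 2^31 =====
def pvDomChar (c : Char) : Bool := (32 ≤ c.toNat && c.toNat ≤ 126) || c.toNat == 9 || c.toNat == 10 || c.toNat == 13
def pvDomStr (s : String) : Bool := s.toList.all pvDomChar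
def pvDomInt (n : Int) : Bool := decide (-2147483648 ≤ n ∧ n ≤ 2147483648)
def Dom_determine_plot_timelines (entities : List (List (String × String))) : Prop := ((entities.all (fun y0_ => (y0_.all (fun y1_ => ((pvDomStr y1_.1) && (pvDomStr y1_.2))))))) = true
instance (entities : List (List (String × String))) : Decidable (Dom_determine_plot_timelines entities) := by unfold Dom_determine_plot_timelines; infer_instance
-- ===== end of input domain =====

-- B replaces A's single fused min/max loop by sorting the usable dates and picking the endpoints (alternative decomposition, not faster).


-- dict lookup entity['start_date'] / entity['end_date']; exact under Pre_ (the key is present)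
def pvGetKey (e : List (String × String)) (k : String) : String :=
  (PySem.Dict.mk e).getD k ""

-- ===== PORT A =====
-- one loop iteration of A: skip 'None' entities, else update both running extremes
def stepA (sd : Option String × Option String) (entity : List (String × String)) :
    Option String × Option String :=
  if pvGetKey entity "start_date" == "None" then sd
  else
    (match sd.1 with
     | none => some (pvGetKey entity "start_date")
     | some v => if pvGetKey entity "start_date" < v then some (pvGetKey entity "start_date") else some v,
     match sd.2 with
     | none => some (pvGetKey entity "end_date")
     | some v => if pvGetKey entity "end_date" > v then some (pvGetKey entity "end_date") else some v)

def determine_plot_timelines (entities : List (List (String × String))) : Option String × Option String :=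
  entities.foldl stepA (none, none)

-- ===== PORT B =====
-- sorted usable start dates; sorted corresponding end dates; return (starts[0], ends[-1])
def determine_plot_timelines_alt (entities : List (List (String × String))) : Option String × Option String :=
  let starts := PySem.List.sorted
    ((entities.filter (fun e => !(pvGetKey e "start_date" == "None"))).map (fun e => pvGetKey e "start_date"))
    (fun x => x) false
  let ends := PySem.List.sorted
    ((entities.filter (fun e => !(pvGetKey e "start_date" == "None"))).map (fun e => pvGetKey e "end_date"))
    (fun x => x) false
  if starts.isEmpty then (none, none)
  else (PySem.List.pyGet? starts 0, PySem.List.pyGet? ends (-1))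

-- ===== PRECONDITION & SPEC =====
-- Pre_ excludes inputs on which Python A raises KeyError: every entity must carry 'start_date',
-- and every non-skipped entity must carry 'end_date'.
def Pre_determine_plot_timelines (entities : List (List (String × String))) : Prop :=
  (entities.all (fun e => (PySem.Dict.mk e).contains "start_date" &&
      ((PySem.Dict.mk e).getD "start_date" "" == "None" || (PySem.Dict.mk e).contains "end_date"))) = true
instance (entities : List (List (String × String))) : Decidable (Pre_determine_plot_timelines entities) := by unfold Pre_determine_plot_timelines; infer_instance
def pvWitness_determine_plot_timelines : (List (List (String × String))) :=
  [[("start_date", "2020"), ("end_date", "2021")], [("start_date", "None")]]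
def Spec_determine_plot_timelines (entities : List (List (String × String))) (out : Option String × Option String) : Prop := out = determine_plot_timelines_alt entities
instance (entities : List (List (String × String))) (out : Option String × Option String) : Decidable (Spec_determine_plot_timelines entities out) := by unfold Spec_determine_plot_timelines; infer_instance

-- ===== CLAIM (what is proved, stated in full; the proofs are below) =====
def Claim_equal_determine_plot_timelines : Prop := ∀ (entities : List (List (String × String))), Dom_determine_plot_timelines entities → Pre_determine_plot_timelines entities → Spec_determine_plot_timelines entities (determine_plot_timelines entities)

-- ===== LEMMAS AND PROOFS =====

def oMin (c : Option String) (n : String) : Option String :=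
  match c with | none => some n | some v => if n < v then some n else some v
def oMax (c : Option String) (n : String) : Option String :=
  match c with | none => some n | some v => if n > v then some n else some v

lemma foldl_oMin_some (t : List String) (x : String) :
    t.foldl oMin (some x) = some (t.foldl min x) := by
  induction t generalizing x with
  | nil => rfl
  | cons y t ih =>
      simp only [List.foldl, oMin]
      split_ifs with h
      · rw [ih, min_eq_right (le_of_lt h)]
      · rw [ih, min_eq_left (not_lt.mp h)]

lemma foldl_oMax_some (t : List String) (x : String) :
    t.foldl oMax (some x) = some (t.foldl max x) := by
  induction t generalizing x with
  | nil => rfl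
  | cons y t ih =>
      simp only [List.foldl, oMax]
      split_ifs with h
      · rw [ih, max_eq_right (le_of_lt h)]
      · rw [ih, max_eq_left (not_lt.mp h)]

-- A's fused loop splits into the two Option-folds over the kept entities
lemma A_fold_split (l : List (List (String × String))) (s e : Option String) :
    l.foldl stepA (s, e)
    = (((l.filter (fun x => !(pvGetKey x "start_date" == "None"))).map (fun x => pvGetKey x "start_date")).foldl oMin s,
       ((l.filter (fun x => !(pvGetKey x "start_date" == "None"))).map (fun x => pvGetKey x "end_date")).foldl oMax e) := by
  induction l generalizing s e with
  | nil => rfl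
  | cons a l ih =>
      by_cases h : pvGetKey a "start_date" == "None"
      · simp [List.foldl_cons, stepA, h, ih]
      · simp [List.foldl_cons, stepA, h, ih, oMin, oMax]

-- foldl min over x::t is the minimum element: it is a member and a lower bound
lemma foldl_min_mem (t : List String) (x : String) : t.foldl min x ∈ x :: t := by
  induction t generalizing x with
  | nil => simp
  | cons y t ih =>
      simp only [List.foldl]
      have h := List.mem_cons.mp (ih (min x y))
      rcases h with h | h
      · rcases min_choice x y with hc | hc <;> rw [h, hc] <;> simp
      · simp [h]

lemma foldl_min_le (t : List String) (x : String) : ∀ y ∈ x :: t, t.foldl min x ≤ y := by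
  induction t generalizing x with
  | nil => simp
  | cons z t ih =>
      intro y hy
      simp only [List.mem_cons] at hy
      have hh : t.foldl min (min x z) ≤ min x z := ih (min x z) (min x z) (by simp)
      rcases hy with h | h | h
      · exact hh.trans ((min_le_left x z).trans h.ge)
      · exact hh.trans ((min_le_right x z).trans h.ge)
      · exact ih (min x z) y (List.mem_cons_of_mem _ h)

lemma foldl_max_mem (t : List String) (x : String) : t.foldl max x ∈ x :: t := by
  induction t generalizing x with
  | nil => simp
  | cons y t ih =>
      simp only [List.foldl]
      have h := List.mem_cons.mp (ih (max x y))
      rcases h with h | h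
      · rcases max_choice x y with hc | hc <;> rw [h, hc] <;> simp
      · simp [h]

lemma foldl_le_max (t : List String) (x : String) : ∀ y ∈ x :: t, y ≤ t.foldl max x := by
  induction t generalizing x with
  | nil => simp
  | cons z t ih =>
      intro y hy
      simp only [List.mem_cons] at hy
      have hh : max x z ≤ t.foldl max (max x z) := ih (max x z) (max x z) (by simp)
      rcases hy with h | h | h
      · exact (h.le.trans (le_max_left x z)).trans hh
      · exact (h.le.trans (le_max_right x z)).trans hh
      · exact ih (max x z) y (List.mem_cons_of_mem _ h)

-- in a (≤)-pairwise list every element is ≤ the last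
lemma pairwise_le_getLast (s : List String) (hp : s.Pairwise (· ≤ ·)) (h : s ≠ []) :
    ∀ y ∈ s, y ≤ s.getLast h := by
  induction s with
  | nil => simp at h
  | cons a t ih =>
      obtain ⟨ha, hp'⟩ := List.pairwise_cons.mp hp
      intro y hy
      cases t with
      | nil =>
          simp only [List.mem_cons, List.not_mem_nil, or_false] at hy
          simp [hy, List.getLast]
      | cons b u =>
          rw [List.getLast_cons (by simp)]
          rcases List.mem_cons.mp hy with h1 | h1
          · exact h1 ▸ ha _ (List.getLast_mem (by simp))
          · exact ih hp' (by simp) y h1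

-- min over xs equals the head of sorted xs
lemma min_eq_sorted_head (x : String) (t : List String)
    (m : String) (st : List String)
    (hs : PySem.List.sorted (x :: t) (fun x => x) false = m :: st) :
    t.foldl min x = m := by
  have hmem : m ∈ x :: t := by
    have := (PySem.List.mem_sorted (xs := x :: t) (key := fun x => x) (rev := false) (x := m))
    rw [hs] at this; exact this.mp (by simp)
  have hle : ∀ y ∈ x :: t, m ≤ y := PySem.List.key_head_sorted_le _ _ hs
  exact le_antisymm (foldl_min_le t x m hmem) (hle _ (foldl_min_mem t x))

-- max over xs equals the last of sorted xs
lemma max_eq_sorted_getLast (x : String) (t : List String)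
    (h : PySem.List.sorted (x :: t) (fun x => x) false ≠ []) :
    t.foldl max x = (PySem.List.sorted (x :: t) (fun x => x) false).getLast h := by
  have hperm : (PySem.List.sorted (x :: t) (fun x => x) false).Perm (x :: t) :=
    PySem.List.sorted_perm _ _ _
  have hpw : (PySem.List.sorted (x :: t) (fun x => x) false).Pairwise (· ≤ ·) := by
    simpa using (PySem.List.sorted_pairwise (xs := x :: t) (key := fun x => x))
  have hmem : (PySem.List.sorted (x :: t) (fun x => x) false).getLast h ∈ x :: t :=
    hperm.mem_iff.mp (List.getLast_mem h)
  have hge : ∀ y ∈ x :: t, y ≤ (PySem.List.sorted (x :: t) (fun x => x) false).getLast h :=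
    fun y hy => pairwise_le_getLast _ hpw h y (hperm.mem_iff.mpr hy)
  exact le_antisymm (hge _ (foldl_max_mem t x)) (foldl_le_max t x _ hmem)

-- the oMin fold over a nonempty list is the head of its sort
lemma foldl_oMin_eq_sorted_get (xs : List String) (hx : xs ≠ []) :
    xs.foldl oMin none = PySem.List.pyGet? (PySem.List.sorted xs (fun x => x) false) 0 := by
  obtain ⟨x, t, rfl⟩ := List.exists_cons_of_ne_nil hx
  have hsne : PySem.List.sorted (x :: t) (fun x => x) false ≠ [] := by
    rw [Ne, PySem.List.sorted_eq_nil_iff]; simp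
  obtain ⟨m, st, hms⟩ := List.exists_cons_of_ne_nil hsne
  simp only [List.foldl_cons, oMin]
  rw [foldl_oMin_some, hms, PySem.List.pyGet?_zero_cons, min_eq_sorted_head _ _ _ _ hms]

-- the oMax fold over a nonempty list is the last element of its sort
lemma foldl_oMax_eq_sorted_get (xs : List String) (hx : xs ≠ []) :
    xs.foldl oMax none = PySem.List.pyGet? (PySem.List.sorted xs (fun x => x) false) (-1) := by
  obtain ⟨x, t, rfl⟩ := List.exists_cons_of_ne_nil hx
  have hsne : PySem.List.sorted (x :: t) (fun x => x) false ≠ [] := by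
    rw [Ne, PySem.List.sorted_eq_nil_iff]; simp
  simp only [List.foldl_cons, oMax]
  rw [foldl_oMax_some, PySem.List.pyGet?_neg_one, List.getLast?_eq_some_getLast hsne,
    max_eq_sorted_getLast x t hsne]

-- ===== VERDICT (by name: the statement is the Claim_ definition above) =====
theorem determine_plot_timelines_spec : Claim_equal_determine_plot_timelines := by
  intro entities _ _
  unfold Spec_determine_plot_timelines determine_plot_timelines determine_plot_timelines_alt
  rw [A_fold_split]
  by_cases hkept : entities.filter (fun e => !(pvGetKey e "start_date" == "None")) = []
  · simp [hkept, PySem.List.sorted]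
  · have hs : (entities.filter (fun e => !(pvGetKey e "start_date" == "None"))).map
        (fun e => pvGetKey e "start_date") ≠ [] := by simpa using hkept
    have he : (entities.filter (fun e => !(pvGetKey e "start_date" == "None"))).map
        (fun e => pvGetKey e "end_date") ≠ [] := by simpa using hkept
    have hsne : PySem.List.sorted ((entities.filter (fun e => !(pvGetKey e "start_date" == "None"))).map
        (fun e => pvGetKey e "start_date")) (fun x => x) false ≠ [] := by
      rw [Ne, PySem.List.sorted_eq_nil_iff]; exact hs
    rw [if_neg (by simpa [List.isEmpty_iff] using hsne)]
    rw [foldl_oMin_eq_sorted_get _ hs, foldl_oMax_eq_sorted_get _ he]
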